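-- pv_equiv track=rewrite | github.com/Osogire/Projet_algo | Instance/Student.py | create_satisfaction_list
-- ===== SOURCE A (Python) =====
-- def create_satisfaction_list(nbr_choices : int, nbr_courses : int) -> 'list[int]':
--     """Crée la liste de satisfaction de l'étudiant. Elle attribue une note aux cours en fonction de la position dans les choix de l'étudiant
--
--     Args:
--         nbr_choices (int): le nombre de choix de l'étudiant
--         nbr_courses (int): le nombre de cours qu'il doit suivre
--
--     Returns:
--         list[int]: la liste de satisfacion
--     """
--     satisfaction_list = []
--     step = 20
--     satisfaction = 100
--     for i in range (nbr_courses):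
--         satisfaction_list.append(satisfaction)
--     satisfaction -= step
--     for i in range (nbr_courses, nbr_choices):
--         satisfaction_list.append(satisfaction)
--         satisfaction -= step
--     return satisfaction_list
-- ===== SOURCE B (Python) =====
-- def create_satisfaction_list(nbr_choices: int, nbr_courses: int) -> 'list[int]':
--     """Build the list back-to-front: walk from the last choice position down to
--     nbr_courses, computing each score from its position, then the 100-block;
--     accumulate in reverse and flip once at the end. No forward append-loops
--     threading a running decremented accumulator."""
--     rev = []
--     pos = nbr_choices
--     while pos > nbr_courses:
--         rev.append(100 - 20 * (pos - nbr_courses))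
--         pos -= 1
--     m = nbr_courses
--     while m > 0:
--         rev.append(100)
--         m -= 1
--     rev.reverse()
--     return rev
-- ===== Notes on version B (the rewrite author's own statement) =====
-- stated objective: alternative
-- what changed: Instead of two forward append-loops threading a decremented 'satisfaction' accumulator, B builds the list back-to-front: it walks from the last choice position down to nbr_courses computing each score from its position, then the 100-block, accumulating in reverse and flipping once at the end.
import Mathlib
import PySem

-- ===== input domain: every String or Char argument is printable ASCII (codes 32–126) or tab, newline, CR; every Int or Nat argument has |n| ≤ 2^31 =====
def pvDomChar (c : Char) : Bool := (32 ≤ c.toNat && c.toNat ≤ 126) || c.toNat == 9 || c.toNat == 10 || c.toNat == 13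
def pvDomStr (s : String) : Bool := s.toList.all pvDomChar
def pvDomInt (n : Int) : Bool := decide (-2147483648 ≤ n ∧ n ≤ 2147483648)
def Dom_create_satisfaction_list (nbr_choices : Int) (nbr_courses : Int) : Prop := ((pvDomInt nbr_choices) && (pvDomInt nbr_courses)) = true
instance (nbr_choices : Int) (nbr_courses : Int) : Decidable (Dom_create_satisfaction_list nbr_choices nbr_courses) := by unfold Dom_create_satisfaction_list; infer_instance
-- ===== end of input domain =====

-- B builds the list back-to-front (positions walked downward, accumulated in reverse,
-- flipped once), instead of A's two forward append-loops with a threaded decremented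
-- accumulator; return values proved equal.


-- ===== PORT A =====
-- literal transliteration: first loop appends satisfaction (=100) nbr_courses times;
-- then satisfaction -= 20; second loop appends and decrements.
def create_satisfaction_list (nbr_choices : Int) (nbr_courses : Int) : List Int :=
  let satisfaction_list : List Int := []
  let step : Int := 20
  let satisfaction : Int := 100
  let satisfaction_list :=
    (PySem.List.pyRange 0 nbr_courses 1).foldl
      (fun acc _ => acc ++ [satisfaction]) satisfaction_list
  let satisfaction := satisfaction - step
  let st :=
    (PySem.List.pyRange nbr_courses nbr_choices 1).foldl
      (fun (p : List Int × Int) _ => (p.1 ++ [p.2], p.2 - step))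
      (satisfaction_list, satisfaction)
  st.1

-- ===== PORT B =====
-- B's first while loop: while pos > nbr_courses, rev.append(100 - 20*(pos - nbr_courses)), pos -= 1.
-- Recursion is on d = pos - nbr_courses (a Nat, since the loop runs only while d > 0).
def pvRevChoices (d : Nat) (rev : List Int) : List Int :=
  match d with
  | 0 => rev
  | Nat.succ d' => pvRevChoices d' (rev ++ [100 - 20 * ((d' : Int) + 1)])

-- B's second while loop: while m > 0, rev.append(100), m -= 1.
def pvRevHundreds (m : Nat) (rev : List Int) : List Int :=
  match m with
  | 0 => rev
  | Nat.succ m' => pvRevHundreds m' (rev ++ [100])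

def create_satisfaction_list_alt (nbr_choices : Int) (nbr_courses : Int) : List Int :=
  (pvRevHundreds nbr_courses.toNat
    (pvRevChoices (nbr_choices - nbr_courses).toNat [])).reverse

-- ===== PRECONDITION & SPEC =====
def Spec_create_satisfaction_list (nbr_choices : Int) (nbr_courses : Int) (out : List Int) : Prop := out = create_satisfaction_list_alt nbr_choices nbr_courses
instance (nbr_choices : Int) (nbr_courses : Int) (out : List Int) : Decidable (Spec_create_satisfaction_list nbr_choices nbr_courses out) := by unfold Spec_create_satisfaction_list; infer_instance

-- ===== CLAIM (what is proved, stated in full; the proofs are below) =====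
def Claim_equal_create_satisfaction_list : Prop := ∀ (nbr_choices : Int) (nbr_courses : Int), Dom_create_satisfaction_list nbr_choices nbr_courses → Spec_create_satisfaction_list nbr_choices nbr_courses (create_satisfaction_list nbr_choices nbr_courses)

-- ===== LEMMAS AND PROOFS =====

-- A's first loop appends a constant once per iteration: it is a replicate block.
theorem pvFoldl_const_append (l : List Int) (L : List Int) (v : Int) :
    l.foldl (fun acc _ => acc ++ [v]) L = L ++ List.replicate l.length v := by
  induction l generalizing L with
  | nil => simp
  | cons x xs ih =>
      simp [List.foldl_cons, ih, List.replicate_succ]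

-- A's second loop threads (list, satisfaction); its result is the initial list followed
-- by the arithmetic progression s, s-20, …, and the final satisfaction is s - 20*length.
theorem pvFoldl_sat_loop (l : List Int) (L : List Int) (s : Int) :
    l.foldl (fun (p : List Int × Int) _ => (p.1 ++ [p.2], p.2 - 20)) (L, s)
      = (L ++ (List.range l.length).map (fun j : Nat => s - 20 * (j : Int)), s - 20 * l.length) := by
  induction l generalizing L s with
  | nil => simp
  | cons x xs ih =>
      rw [List.foldl_cons, ih]
      refine Prod.ext ?_ ?_
      · show L ++ [s] ++ _ = L ++ _
        rw [List.append_assoc]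
        congr 1
        rw [List.length_cons, List.range_succ_eq_map, List.map_cons, List.map_map]
        simp only [Nat.cast_zero, mul_zero, sub_zero, List.singleton_append, List.cons.injEq]
        refine ⟨trivial, List.map_congr_left ?_⟩
        intro j _
        simp only [Function.comp]
        push_cast
        ring
      · show s - 20 - 20 * (xs.length : Int) = s - 20 * ((x :: xs).length : Int)
        rw [List.length_cons]
        push_cast
        ring

-- B's down-walking loop appends the reversed ascending-index progression …, 60, 80.
theorem pvRevChoices_eq (d : Nat) (rev : List Int) :
    pvRevChoices d rev
      = rev ++ ((List.range d).map (fun j : Nat => (80 : Int) - 20 * (j : Int))).reverse := by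
  induction d generalizing rev with
  | zero => simp [pvRevChoices]
  | succ d' ih =>
      rw [pvRevChoices, ih, List.range_succ, List.map_append, List.reverse_append]
      simp only [List.map_cons, List.map_nil, List.reverse_cons, List.reverse_nil,
        List.nil_append, List.append_assoc, List.singleton_append]
      congr 2
      push_cast
      ring_nf

-- B's 100-block loop appends a replicate block.
theorem pvRevHundreds_eq (m : Nat) (rev : List Int) :
    pvRevHundreds m rev = rev ++ List.replicate m 100 := by
  induction m generalizing rev with
  | zero => simp [pvRevHundreds]
  | succ m' ih =>
      rw [pvRevHundreds, ih]
      simp [List.replicate_succ, ← List.replicate_succ']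

theorem create_satisfaction_list_eq (c k : Int) :
    create_satisfaction_list c k = create_satisfaction_list_alt c k := by
  simp only [create_satisfaction_list, create_satisfaction_list_alt]
  rw [pvFoldl_const_append, pvFoldl_sat_loop, pvRevHundreds_eq, pvRevChoices_eq]
  simp only [PySem.List.pyRange_one, List.length_map, List.length_range, List.nil_append,
    List.append_nil, Int.sub_zero, List.reverse_append, List.reverse_reverse,
    List.reverse_replicate]
  norm_num

-- ===== VERDICT (by name: the statement is the Claim_ definition above) =====
theorem create_satisfaction_list_spec : Claim_equal_create_satisfaction_list := by
  intro c k _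
  exact create_satisfaction_list_eq c k
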